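-- pv_equiv track=rewrite | github.com/owenjchen/acsl_python | sumaddle_puzzle_v2.py | check_zero_x_x_zero
-- ===== SOURCE A (Python) =====
-- def check_zero_x_x_zero(row):
--     first_zero = -1
--     for i in range(len(row)):
--         if row[i] == 0:
--             if first_zero < 0:
--                 first_zero = i
--             else:
--                 if i > (first_zero + 2):
--                     return True
--     return False
-- ===== SOURCE B (Python) =====
-- def check_zero_x_x_zero(row):
--     if 0 in row:
--         first = row.index(0)
--         last = len(row) - 1 - row[::-1].index(0)
--         return last - first > 2
--     return False
-- ===== Notes on version B (the rewrite author's own statement) =====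
-- stated objective: simpler
-- what changed: Replaces A's index scan with mutable first-zero state and early return by a closed-form comparison of the two extreme zero positions, located directly with list.index on the row and its reverse.
import Mathlib
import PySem

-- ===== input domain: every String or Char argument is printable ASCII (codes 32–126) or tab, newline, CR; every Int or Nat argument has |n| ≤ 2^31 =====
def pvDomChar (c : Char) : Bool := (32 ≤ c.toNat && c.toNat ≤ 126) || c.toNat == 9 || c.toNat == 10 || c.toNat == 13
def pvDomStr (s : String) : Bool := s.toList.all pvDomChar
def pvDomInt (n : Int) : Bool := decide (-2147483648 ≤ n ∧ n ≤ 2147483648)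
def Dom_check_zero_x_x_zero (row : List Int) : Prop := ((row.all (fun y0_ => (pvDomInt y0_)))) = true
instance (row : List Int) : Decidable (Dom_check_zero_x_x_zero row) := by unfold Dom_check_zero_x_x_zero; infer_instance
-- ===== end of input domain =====

-- B replaces A's stateful scan (record first zero, early-return on a later far zero) by a
-- closed-form comparison of the first and last zero positions found with list.index; objective: simpler.


-- ===== PORT A =====
-- A's `for i in range(len(row))` with state first_zero (initially -1) and early return,
-- as structural recursion over the list carrying the running index i.
def czLoop : List Int → Nat → Int → Bool
  | [], _, _ => false
  | x :: rest, i, fz =>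
    if x = 0 then
      if fz < 0 then czLoop rest (i + 1) (i : Int)
      else if (i : Int) > fz + 2 then true
      else czLoop rest (i + 1) fz
    else czLoop rest (i + 1) fz

def check_zero_x_x_zero (row : List Int) : Bool := czLoop row 0 (-1)

-- ===== PORT B =====
def check_zero_x_x_zero_alt (row : List Int) : Bool :=
  if (0 : Int) ∈ row then
    let first : Nat := (PySem.List.index? row 0).getD 0                     -- row.index(0)
    let rev : List Int := (PySem.List.slice? row none none (-1)).getD []   -- row[::-1]
    let last : Int := (row.length : Int) - 1 - ((PySem.List.index? rev 0).getD 0)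
    decide (last - (first : Int) > 2)
  else false

-- ===== PRECONDITION & SPEC =====
def Spec_check_zero_x_x_zero (row : List Int) (out : Bool) : Prop := out = check_zero_x_x_zero_alt row
instance (row : List Int) (out : Bool) : Decidable (Spec_check_zero_x_x_zero row out) := by unfold Spec_check_zero_x_x_zero; infer_instance

-- ===== CLAIM (what is proved, stated in full; the proofs are below) =====
def Claim_equal_check_zero_x_x_zero : Prop := ∀ (row : List Int), Dom_check_zero_x_x_zero row → Spec_check_zero_x_x_zero row (check_zero_x_x_zero row)

-- ===== LEMMAS AND PROOFS =====

-- Found phase of A's loop: a first zero was recorded at index f and the scan continues at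
-- absolute index i; the loop returns true iff some remaining zero lies beyond f + 2.
lemma czLoop_found (rest : List Int) : ∀ (i f : Nat),
    czLoop rest i (f : Int) = true ↔ ∃ k, ∃ h : k < rest.length, rest[k] = 0 ∧ f + 2 < i + k := by
  induction rest with
  | nil => intro i f; simp [czLoop]
  | cons x rest ih =>
    intro i f
    by_cases hx : x = 0
    · subst hx
      simp only [czLoop]
      rw [if_pos trivial, if_neg (show ¬((f : Int) < 0) by omega)]
      by_cases hgt : (i : Int) > (f : Int) + 2
      · rw [if_pos hgt]
        constructor
        · intro _; exact ⟨0, by simp, by simp, by omega⟩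
        · intro _; rfl
      · rw [if_neg hgt, ih (i + 1) f]
        constructor
        · rintro ⟨k, hk, hz, hlt⟩
          exact ⟨k + 1, by simpa using hk, by simpa using hz, by omega⟩
        · rintro ⟨k, hk, hz, hlt⟩
          match k with
          | 0 => exact absurd (show (i : Int) > (f : Int) + 2 by omega) hgt
          | k + 1 =>
            exact ⟨k, by simpa using hk, by simpa using hz, by omega⟩
    · simp only [czLoop]
      rw [if_neg hx, ih (i + 1) f]
      constructor
      · rintro ⟨k, hk, hz, hlt⟩
        exact ⟨k + 1, by simpa using hk, by simpa using hz, by omega⟩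
      · rintro ⟨k, hk, hz, hlt⟩
        match k with
        | 0 => exact absurd (by simpa using hz) hx
        | k + 1 => exact ⟨k, by simpa using hk, by simpa using hz, by omega⟩

lemma czLoop_search (row : List Int) : ∀ (i : Nat),
    czLoop row i (-1) = true ↔
      ∃ f j, List.idxOf? (0 : Int) row = some f ∧ ∃ h : j < row.length, row[j] = 0 ∧ f + 2 < j := by
  induction row with
  | nil => intro i; simp [czLoop]
  | cons x rest ih =>
    intro i
    by_cases hx : x = 0
    · subst hx
      simp only [czLoop]
      rw [if_pos trivial, if_pos (show (-1:Int) < 0 by norm_num), czLoop_found rest (i + 1) i]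
      constructor
      · rintro ⟨k, hk, hz, hlt⟩
        refine ⟨0, k + 1, by simp [List.idxOf?_cons], by simpa using hk, by simpa using hz, by omega⟩
      · rintro ⟨f, j, hf, hj, hz, hlt⟩
        have hf0 : f = 0 := by simpa [List.idxOf?_cons] using hf.symm
        subst hf0
        match j with
        | 0 => omega
        | j + 1 =>
          exact ⟨j, by simpa using hj, by simpa using hz, by omega⟩
    · simp only [czLoop]
      rw [if_neg hx, ih (i + 1)]
      constructor
      · rintro ⟨f, j, hf, hj, hz, hlt⟩
        refine ⟨f + 1, j + 1, ?_, by simpa using hj, by simpa using hz, by omega⟩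
        simp [List.idxOf?_cons, hx, hf]
      · rintro ⟨f, j, hf, hj, hz, hlt⟩
        rw [List.idxOf?_cons] at hf
        simp [hx] at hf
        obtain ⟨f', hf', rfl⟩ := hf
        match j with
        | 0 => exact absurd (by simpa using hz) hx
        | j + 1 =>
          exact ⟨f', j, hf', by simpa using hj, by simpa using hz, by omega⟩



-- Main proof, inlined at the verdict: A = B, via the first-zero/last-zero characterisation.

-- ===== VERDICT (by name: the statement is the Claim_ definition above) =====
theorem check_zero_x_x_zero_spec : Claim_equal_check_zero_x_x_zero := by
  intro row _
  show check_zero_x_x_zero row = check_zero_x_x_zero_alt row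
  rw [check_zero_x_x_zero, check_zero_x_x_zero_alt]
  by_cases hmem : (0 : Int) ∈ row
  · rw [if_pos hmem]
    obtain ⟨f, hf⟩ := Option.isSome_iff_exists.mp ((PySem.List.index?_isSome_iff row (0:Int)).mpr hmem)
    have hmemr : (0 : Int) ∈ row.reverse := by simpa using hmem
    obtain ⟨r, hr⟩ := Option.isSome_iff_exists.mp ((PySem.List.index?_isSome_iff row.reverse (0:Int)).mpr hmemr)
    obtain ⟨hrlen, hrz, hrmin⟩ := PySem.List.getElem_of_index?_eq_some hr
    have hlen0 : 0 < row.length := List.length_pos_of_mem hmem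
    have hrlen' : r < row.length := by simpa using hrlen
    have hL : row.length - 1 - r < row.length := by omega
    have hLz : row[row.length - 1 - r]'hL = 0 := by
      rw [List.getElem_reverse] at hrz
      convert hrz using 2
    have hLmax : ∀ j, ∀ h : j < row.length, row[j] = 0 → j ≤ row.length - 1 - r := by
      intro j hj hz
      by_contra hlt
      have hj' : row.length - 1 - j < r := by omega
      have hne : row.reverse[row.length - 1 - j]'(by simp; omega) ≠ 0 := hrmin _ hj'
      rw [List.getElem_reverse] at hne
      exact hne (by simpa [show row.length - 1 - (row.length - 1 - j) = j by omega] using hz)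
    rw [PySem.List.slice?_none_none_neg_one]
    simp only [hf, hr, Option.getD_some]
    obtain ⟨hflen, hfz, _⟩ := PySem.List.getElem_of_index?_eq_some hf
    rw [PySem.List.index?_eq_idxOf?] at hf
    rcases Bool.eq_false_or_eq_true (czLoop row 0 (-1)) with hA | hA
    · -- hA : = true
      rw [hA]; symm
      rw [decide_eq_true_iff]
      rw [czLoop_search row 0] at hA
      obtain ⟨f', j, hf', hj, hz, hlt⟩ := hA
      have hff : f' = f := by rw [hf] at hf'; exact (Option.some_inj.mp hf').symm
      subst hff
      have := hLmax j hj hz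
      omega
    · rw [hA]; symm
      rw [decide_eq_false_iff_not]
      intro hgt
      have htrue : czLoop row 0 (-1) = true := by
        rw [czLoop_search row 0]
        refine ⟨f, row.length - 1 - r, hf, hL, hLz, by omega⟩
      rw [htrue] at hA; exact absurd hA (by simp)
  · rw [if_neg hmem]
    rcases Bool.eq_false_or_eq_true (czLoop row 0 (-1)) with hA | hA
    · rw [czLoop_search row 0] at hA
      obtain ⟨fz, j, hfz, hj, hz, _⟩ := hA
      exact absurd (List.mem_of_getElem hz) hmem
    · exact hA
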